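-- pv_equiv track=rewrite | github.com/psych-mind/HTEA | utils_side.py | index_tem_triples_w
-- ===== SOURCE A (Python) =====
-- def index_tem_triples_w(triples):
--     """
--     index the temporal triples for yago and wiki set
--     for the simplicity, we generate the index for (head, tail) pair.
--     """
--     rec = {}
--     rec_w = {}
--     for triple in triples:
--         head, rel, tail, ts, te = triple
--         #head_y, tail_y = all_pair_dic_inverse[head], all_pair_dic_inverse[tail]
--         if ts != 0 or te != 0:
--             if (head, tail) not in rec_w:
--                 rec_w[(head, tail)] = []
--                 rec_w[(head, tail)].append(triple)
--             else:
--                 rec_w[(head, tail)].append(triple)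
--             #if (head_y, tail_y) not in rec:
--             #    rec[(head_y, tail_y)] = []
--             #    rec[(head_y, tail_y)].append([head_y, rel, tail_y, ts, te])
--             #else:
--             #    rec[(head_y, tail_y)].append([head_y, rel, tail_y, ts, te])
--     return rec_w
-- ===== SOURCE B (Python) =====
-- def index_tem_triples_w(triples):
--     """Alternative decomposition: filter once, collect the distinct (head, tail)
--     keys in first-occurrence order, then build each group by a per-key scan."""
--     filtered = [t for t in triples if t[3] != 0 or t[4] != 0]
--     keys = dict.fromkeys((t[0], t[2]) for t in filtered)
--     return {k: [t for t in filtered if (t[0], t[2]) == k] for k in keys}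
-- ===== Notes on version B (the rewrite author's own statement) =====
-- stated objective: alternative
-- what changed: Replaces the single-pass hash-bucket accumulation with a two-phase decomposition: filter the temporal triples once, dedupe the (head,tail) keys in first-occurrence order, then build each group by a per-key scan of the filtered list.
import Mathlib
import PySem

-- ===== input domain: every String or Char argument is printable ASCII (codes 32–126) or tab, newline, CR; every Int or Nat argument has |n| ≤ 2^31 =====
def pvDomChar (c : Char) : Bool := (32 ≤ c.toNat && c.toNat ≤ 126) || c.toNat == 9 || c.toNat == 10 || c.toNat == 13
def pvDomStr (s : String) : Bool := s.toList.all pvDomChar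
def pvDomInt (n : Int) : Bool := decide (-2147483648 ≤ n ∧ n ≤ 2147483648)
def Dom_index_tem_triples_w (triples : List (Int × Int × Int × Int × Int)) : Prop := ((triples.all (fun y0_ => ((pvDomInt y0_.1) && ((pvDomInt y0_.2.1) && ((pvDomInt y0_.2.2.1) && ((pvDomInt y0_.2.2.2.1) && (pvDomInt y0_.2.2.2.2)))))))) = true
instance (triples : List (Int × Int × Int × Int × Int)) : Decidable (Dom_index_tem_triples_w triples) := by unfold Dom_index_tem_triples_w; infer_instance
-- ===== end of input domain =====

-- B replaces A's single-pass dict-bucket accumulation by filter-once / dedup-keys / per-key scan (alternative decomposition, same return value).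


-- ===== PORT A =====
-- literal port of A's loop: for each triple, if ts != 0 or te != 0, ensure the
-- (head, tail) bucket exists (insert []) and append the triple to it.
def pvStepA (d : PySem.Dict (Int × Int) (List (Int × Int × Int × Int × Int)))
    (t : Int × Int × Int × Int × Int) : PySem.Dict (Int × Int) (List (Int × Int × Int × Int × Int)) :=
  match t with
  | (head, _rel, tail, ts, te) =>
    if ts != 0 || te != 0 then
      if (PySem.Dict.contains d (head, tail)) = false then
        ((d.insert (head, tail) []).modify (head, tail) [] (fun v => v ++ [t]))
      else
        d.modify (head, tail) [] (fun v => v ++ [t])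
    else d

-- the dict rec_w is returned; under the type convention its ((h,t), v) items are flattened to (h, t, v)
def index_tem_triples_w (triples : List (Int × Int × Int × Int × Int)) : List (Int × Int × List (Int × Int × Int × Int × Int)) :=
  ((triples.foldl pvStepA PySem.Dict.empty).items).map (fun q => (q.1.1, q.1.2, q.2))

-- ===== PORT B =====
def pvKeep (t : Int × Int × Int × Int × Int) : Bool := t.2.2.2.1 != 0 || t.2.2.2.2 != 0
def pvKey (t : Int × Int × Int × Int × Int) : Int × Int := (t.1, t.2.2.1)

def index_tem_triples_w_alt (triples : List (Int × Int × Int × Int × Int)) : List (Int × Int × List (Int × Int × Int × Int × Int)) :=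
  let filtered := triples.filter pvKeep
  let keys := PySem.List.dedup (filtered.map pvKey)
  keys.map (fun k => (k.1, k.2, filtered.filter (fun t => pvKey t == k)))

-- ===== PRECONDITION & SPEC =====
-- instance search times out on this nested type; the DecidableEq term is given explicitly
def pvDecEqOut : DecidableEq (List (Int × Int × List (Int × Int × Int × Int × Int))) :=
  @instDecidableEqList _
    (@instDecidableEqProd _ _ Int.instDecidableEq
      (@instDecidableEqProd _ _ Int.instDecidableEq
        (@instDecidableEqList _ (inferInstance : DecidableEq (Int × Int × Int × Int × Int)))))

def Spec_index_tem_triples_w (triples : List (Int × Int × Int × Int × Int)) (out : List (Int × Int × List (Int × Int × Int × Int × Int))) : Prop := out = index_tem_triples_w_alt triples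
instance (triples : List (Int × Int × Int × Int × Int)) (out : List (Int × Int × List (Int × Int × Int × Int × Int))) : Decidable (Spec_index_tem_triples_w triples out) := by unfold Spec_index_tem_triples_w; exact pvDecEqOut _ _

-- ===== CLAIM (what is proved, stated in full; the proofs are below) =====
def Claim_equal_index_tem_triples_w : Prop := ∀ (triples : List (Int × Int × Int × Int × Int)), Dom_index_tem_triples_w triples → Spec_index_tem_triples_w triples (index_tem_triples_w triples)

-- ===== LEMMAS AND PROOFS =====

-- A's step equals "if kept, modify-append to the bucket": the insert-then-append
-- branch collapses because modify k [] f = insert k (f (getD k [])).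
lemma pvStepA_eq (d : PySem.Dict (Int × Int) (List (Int × Int × Int × Int × Int)))
    (t : Int × Int × Int × Int × Int) :
    pvStepA d t = if pvKeep t then d.modify (pvKey t) [] (fun v => v ++ [t]) else d := by
  obtain ⟨h, r, tl, ts, te⟩ := t
  simp only [pvStepA, pvKeep, pvKey, PySem.Dict.modify]
  by_cases hk : (ts != 0 || te != 0) = true
  · simp only [hk, if_true]
    by_cases hc : PySem.Dict.contains d (h, tl) = false
    · simp [hc, PySem.Dict.getD_insert_self, PySem.Dict.insert_insert_self,
        PySem.Dict.getD_of_not_contains d ([] : List (Int × Int × Int × Int × Int)) hc]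
    · simp [hc]
  · simp [hk]

lemma pvFoldlCongr {α β : Type} {f g : β → α → β} {l : List α} {b : β}
    (h : ∀ acc x, x ∈ l → f acc x = g acc x) : l.foldl f b = l.foldl g b := by
  induction l generalizing b with
  | nil => rfl
  | cons a l ih => simp only [List.foldl_cons, h b a (by simp)]
                   exact ih (fun acc x hx => h acc x (by simp [hx]))

lemma pvFold_eq (triples : List (Int × Int × Int × Int × Int)) :
    triples.foldl pvStepA PySem.Dict.empty =
      (triples.filter pvKeep).foldl
        (fun d t => d.modify (pvKey t) [] (fun v => v ++ [t])) PySem.Dict.empty := by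
  rw [List.foldl_filter]
  exact (pvFoldlCongr (fun d t _ => pvStepA_eq d t))

-- value at each key of the grouping fold = the per-key filter of the processed list
lemma pvGetD_fold (l : List (Int × Int × Int × Int × Int)) (k : Int × Int) :
    (l.foldl (fun d t => d.modify (pvKey t) [] (fun v => v ++ [t])) PySem.Dict.empty).getD k [] =
      l.filter (fun t => pvKey t == k) := by
  have hmap : l.foldl (fun d t => d.modify (pvKey t) [] (fun v => v ++ [t])) PySem.Dict.empty
      = (l.map (fun t => (pvKey t, t))).foldl
          (fun d p => d.modify p.1 [] (fun v => v ++ [p.2])) PySem.Dict.empty := by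
    rw [List.foldl_map]
  rw [hmap, PySem.Dict.getD_foldl_modify_append, List.filter_map, List.map_map]
  simp [Function.comp_def]

-- ===== VERDICT (by name: the statement is the Claim_ definition above) =====
theorem index_tem_triples_w_spec : Claim_equal_index_tem_triples_w := by
  intro triples _
  unfold Spec_index_tem_triples_w index_tem_triples_w index_tem_triples_w_alt
  rw [pvFold_eq]
  set l := triples.filter pvKeep with hl
  set D := l.foldl (fun d t => d.modify (pvKey t) [] (fun v => v ++ [t])) PySem.Dict.empty with hD
  have hnodup : D.keys.Nodup := by
    rw [hD]
    exact PySem.Dict.nodup_keys_foldl_modify_key l pvKey [] (fun _ t v => v ++ [t]) _ (by simp)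
  have hkeys : D.keys = PySem.List.dedup (l.map pvKey) := by
    rw [hD, PySem.Dict.keys_foldl_modify_key l pvKey [] (fun _ t v => v ++ [t])]
    simp [PySem.List.dedup, PySem.Set.update_nil_left, PySem.Dict.keys_empty]
  rw [PySem.Dict.items_eq_map_keys D hnodup [], List.map_map, hkeys]
  refine List.map_congr_left (fun k _ => ?_)
  simp only [Function.comp_def]
  rw [hD, pvGetD_fold]
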